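-- pv_equiv track=rewrite | github.com/W567871/LC | UCO/findReplace2.py | convert
-- ===== SOURCE A (Python) =====
-- class DisjointSet(object):
--
--     def __init__(self):
--         self.leader = {} # maps a member to the group's leader
--         self.group = {} # maps a group leader to the group (which is a set)
--
--     def add(self, a, b):
--         leadera = self.leader.get(a)
--         leaderb = self.leader.get(b)
--         if leadera is not None:
--             if leaderb is not None:
--                 if leadera == leaderb: return # nothing to do
--                 groupa = self.group[leadera]
--                 groupb = self.group[leaderb]
--                 if len(groupa) < len(groupb):
--                     a, leadera, groupa, b, leaderb, groupb = b, leaderb, groupb, a, leadera, groupa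
--                 groupa |= groupb
--                 del self.group[leaderb]
--                 for k in groupb:
--                     self.leader[k] = leadera
--             else:
--                 self.group[leadera].add(b)
--                 self.leader[b] = leadera
--         else:
--             if leaderb is not None:
--                 self.group[leaderb].add(a)
--                 self.leader[a] = leaderb
--             else:
--                 self.leader[a] = self.leader[b] = a
--                 self.group[a] = set([a, b])
--
-- def convert(str1:str, str2:str) -> int:
--     if str1 == str2:
--       return 0
--
--     mappings = {}
--
--     # No char in str1 can be mapped to > 1 char in str2
--     for a, b in zip(str1, str2):
--       if mappings.get(a, b) != b:
--         return -1
--       mappings[a] = b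
--
--     # No char in str1 maps to > 1 char in str2 and
--     # There is at lest one temp char can break any loops
--     if (len(set(str2)) >= 52):
--         return -1;
--
--
--     ds = DisjointSet()
--
--     twoElemCycCt = 0
--     count = 0
--     for key, value in mappings.items():
--         if (key == value):
--             continue;
--         count += 1
--         if (mappings.get(value) == key):
--             twoElemCycCt +=1
--             continue
--         ds.add(key, value)
--
--     twoElemCycCt = twoElemCycCt // 2
--     mulElemCycCt = 0
--     for key, value in ds.group.items():
--         if (len(value) > 2):
--             mulElemCycCt += 1
--
--     count = count + twoElemCycCt + mulElemCycCt
--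
--     return count
-- ===== SOURCE B (Python) =====
-- def convert(str1: str, str2: str) -> int:
--     if str1 == str2:
--         return 0
--     mappings = {}
--     for a, b in zip(str1, str2):
--         if mappings.setdefault(a, b) != b:
--             return -1
--     if len(set(str2)) >= 52:
--         return -1
--     items = list(mappings.items())
--     count = sum(1 for k, v in items if k != v)
--     two = sum(1 for k, v in items if k != v and mappings.get(v) == k) // 2
--     # edges of the (non-identity, non-2-cycle) mapping graph
--     edges = [(k, v) for k, v in items if k != v and mappings.get(v) != k]
--     # connected components as a plain list of member lists, merged as edges arrive
--     comps = []
--     for k, v in edges: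
--         ia = next((i for i, c in enumerate(comps) if k in c), None)
--         ib = next((i for i, c in enumerate(comps) if v in c), None)
--         if ia is None and ib is None:
--             comps.append([k, v])
--         elif ib is None:
--             comps[ia].append(v)
--         elif ia is None:
--             comps[ib].append(k)
--         elif ia != ib:
--             comps[ia] += comps[ib]
--             del comps[ib]
--     big = sum(1 for c in comps if len(c) > 2)
--     return count + two + big
-- ===== Notes on version B (the rewrite author's own statement) =====
-- stated objective: alternative
-- what changed: Replaces the DisjointSet class (leader map plus size-balanced group merging) with three comprehensions over the mapping items (count, 2-cycles, edge list) and a plain list-of-component-member-lists merged by linear scan per edge; components with more than two members are then counted directly.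
import Mathlib
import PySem

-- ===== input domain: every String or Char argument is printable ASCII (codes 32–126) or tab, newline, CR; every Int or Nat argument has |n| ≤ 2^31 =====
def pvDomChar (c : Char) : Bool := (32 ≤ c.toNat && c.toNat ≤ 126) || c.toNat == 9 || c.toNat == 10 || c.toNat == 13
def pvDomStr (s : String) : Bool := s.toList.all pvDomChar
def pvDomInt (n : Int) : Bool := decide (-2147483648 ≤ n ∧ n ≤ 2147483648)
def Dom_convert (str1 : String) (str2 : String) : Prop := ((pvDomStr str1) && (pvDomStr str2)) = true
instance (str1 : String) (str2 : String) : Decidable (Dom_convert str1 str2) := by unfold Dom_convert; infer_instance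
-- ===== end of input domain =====

-- B replaces A's DisjointSet (leader map + size-balanced merging) by three comprehensions over the
-- mapping items and a plain list of component member-lists merged by linear scan (objective: alternative).

-- ===== PORT A =====
structure PyDS where
  leader : PySem.Dict Char Char
  group  : PySem.Dict Char (PySem.Set Char)

-- DisjointSet.add; Python indexes self.group[leadera] / self.group[leaderb], whose keys are always
-- present when that line is reached, so the `PySem.Set.empty` defaults are never used.
def dsAdd (ds : PyDS) (a b : Char) : PyDS :=
  match ds.leader.get? a, ds.leader.get? b with
  | some leadera, some leaderb =>
      if leadera == leaderb then ds
      else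
        let groupa := ds.group.getD leadera PySem.Set.empty
        let groupb := ds.group.getD leaderb PySem.Set.empty
        let s : Char × PySem.Set Char × Char × PySem.Set Char :=
          if PySem.Set.len groupa < PySem.Set.len groupb
          then (leaderb, groupb, leadera, groupa) else (leadera, groupa, leaderb, groupb)
        { leader := s.2.2.2.foldl (fun L k => L.insert k s.1) ds.leader,
        -- groupa |= groupb mutates the set stored at key s.1 in place (insert keeps the position),
        -- then `del self.group[leaderb]`
          group := (ds.group.insert s.1 (PySem.Set.union s.2.1 s.2.2.2)).erase s.2.2.1 }
  | some leadera, none =>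
      { leader := ds.leader.insert b leadera,
        group := ds.group.modify leadera PySem.Set.empty (fun s => PySem.Set.add s b) }
  | none, some leaderb =>
      { leader := ds.leader.insert a leaderb,
        group := ds.group.modify leaderb PySem.Set.empty (fun s => PySem.Set.add s a) }
  | none, none =>
      { leader := (ds.leader.insert a a).insert b a,
        group := ds.group.insert a (PySem.Set.ofList [a, b]) }

-- the `for a, b in zip(str1, str2)` loop with its early `return -1`
def buildMapA : List (Char × Char) → PySem.Dict Char Char → Option (PySem.Dict Char Char)
  | [], m => some m
  | (a, b) :: rest, m =>
      if m.getD a b != b then none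
      else buildMapA rest (m.insert a b)

-- body of the `for key, value in mappings.items()` loop; state = (ds, twoElemCycCt, count)
def loopA (m : PySem.Dict Char Char) (st : PyDS × Int × Int) (kv : Char × Char) :
    PyDS × Int × Int :=
  if kv.1 == kv.2 then st
  else
    let count := st.2.2 + 1
    if m.get? kv.2 == some kv.1 then (st.1, st.2.1 + 1, count)
    else (dsAdd st.1 kv.1 kv.2, st.2.1, count)

def convert (str1 : String) (str2 : String) : Int :=
  if str1 == str2 then 0
  else
    match buildMapA (str1.toList.zip str2.toList) PySem.Dict.empty with
    | none => -1
    | some mappings =>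
      if 52 ≤ PySem.Set.len (PySem.Set.ofList str2.toList) then -1
      else
        let r := mappings.items.foldl (loopA mappings) (⟨PySem.Dict.empty, PySem.Dict.empty⟩, 0, 0)
        let twoElemCycCt := PySem.Int.floordiv r.2.1 2
        let mulElemCycCt := r.1.group.items.foldl
          (fun (acc : Int) kv => if 2 < PySem.Set.len kv.2 then acc + 1 else acc) 0
        r.2.2 + twoElemCycCt + mulElemCycCt

-- ===== PORT B =====
-- the same zip loop written with setdefault (Source B)
def buildMapB : List (Char × Char) → PySem.Dict Char Char → Option (PySem.Dict Char Char)
  | [], m => some m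
  | (a, b) :: rest, m =>
      if (m.get? a).getD b != b then none
      else buildMapB rest (m.setdefault a b)

-- next((i for i, c in enumerate(comps) if x in c), None)
def findComp (comps : List (List Char)) (x : Char) : Option Nat :=
  comps.findIdx? (fun c => c.contains x)

-- one step of Source B's component-merging loop
def mergeStep (comps : List (List Char)) (kv : Char × Char) : List (List Char) :=
  match findComp comps kv.1, findComp comps kv.2 with
  | none,    none    => comps ++ [[kv.1, kv.2]]
  | some ia, none    => comps.modify ia (fun c => c ++ [kv.2])
  | none,    some ib => comps.modify ib (fun c => c ++ [kv.1])
  | some ia, some ib =>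
      if ia ≠ ib then (comps.modify ia (fun c => c ++ comps.getD ib [])).eraseIdx ib
      else comps

def convert_alt (str1 : String) (str2 : String) : Int :=
  if str1 == str2 then 0
  else
    match buildMapB (str1.toList.zip str2.toList) PySem.Dict.empty with
    | none => -1
    | some mappings =>
      if 52 ≤ PySem.Set.len (PySem.Set.ofList str2.toList) then -1
      else
        let items := mappings.items
        let count : Int := items.countP (fun kv => kv.1 != kv.2)
        let two : Int := items.countP (fun kv => kv.1 != kv.2 && mappings.get? kv.2 == some kv.1)
        let edges := items.filter (fun kv => kv.1 != kv.2 && mappings.get? kv.2 != some kv.1)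
        let comps := edges.foldl mergeStep []
        let big : Int := comps.countP (fun c => 2 < c.length)
        count + PySem.Int.floordiv two 2 + big

-- ===== PRECONDITION & SPEC =====
def Spec_convert (str1 : String) (str2 : String) (out : Int) : Prop := out = convert_alt str1 str2
instance (str1 : String) (str2 : String) (out : Int) : Decidable (Spec_convert str1 str2 out) := by unfold Spec_convert; infer_instance

-- ===== CLAIM (what is proved, stated in full; the proofs are below) =====
def Claim_equal_convert : Prop := ∀ (str1 : String) (str2 : String), Dom_convert str1 str2 → Spec_convert str1 str2 (convert str1 str2)

-- ===== LEMMAS AND PROOFS =====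

theorem insert_self_of_get? (m : PySem.Dict Char Char) (a b : Char)
    (hnd : m.keys.Nodup) (h : m.get? a = some b) : m.insert a b = m := by
  have hc : m.contains a = true := by
    rw [PySem.Dict.contains_eq_isSome_get?, h]; rfl
  apply PySem.Dict.ext
  rw [PySem.Dict.items_insert_of_contains _ _ hc]
  have hmap : ∀ p ∈ m.items, (if (p.1 == a) = true then (a, b) else p) = p := by
    intro p hp
    obtain ⟨p1, p2⟩ := p
    by_cases hpa : p1 = a
    · subst hpa
      have := PySem.Dict.get?_of_mem_items _ hp hnd
      rw [h] at this
      simp [Option.some.injEq] at this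
      simp [this]
    · simp [hpa]
  calc m.items.map (fun p => if (p.1 == a) = true then (a, b) else p)
      = m.items.map id := List.map_congr_left hmap
    _ = m.items := List.map_id _

theorem buildMap_eq (zs : List (Char × Char)) (m : PySem.Dict Char Char)
    (hnd : m.keys.Nodup) : buildMapA zs m = buildMapB zs m := by
  induction zs generalizing m with
  | nil => rfl
  | cons p rest ih =>
      obtain ⟨a, b⟩ := p
      simp only [buildMapA, buildMapB, PySem.Dict.getD_eq_get?_getD]
      obtain hga | ⟨c, hga⟩ := Option.eq_none_or_eq_some (m.get? a)
      case inl =>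
          simp only [hga]
          have hc : m.contains a = false := by
            rw [PySem.Dict.contains_eq_isSome_get?, hga]; rfl
          simp only [Option.getD_none, bne_self_eq_false, Bool.false_eq_true, if_false]
          rw [PySem.Dict.setdefault_of_not_contains _ _ hc]
          exact ih _ (PySem.Dict.nodup_keys_insert _ _ _ hnd)
      case inr =>
          simp only [hga]
          by_cases hcb : c = b
          · subst hcb
            have hc : m.contains a = true := by
              rw [PySem.Dict.contains_eq_isSome_get?, hga]; rfl
            simp only [Option.getD_some, bne_self_eq_false, Bool.false_eq_true, if_false]
            rw [insert_self_of_get? m a c hnd hga, PySem.Dict.setdefault_of_contains _ _ hc]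
            exact ih m hnd
          · have : (c != b) = true := by simp [hcb]
            simp [this]

-- ---- the three components of A's items-loop ----

theorem loopA_count (m : PySem.Dict Char Char) (l : List (Char × Char)) :
    ∀ st : PyDS × Int × Int,
      (l.foldl (loopA m) st).2.2 = st.2.2 + (l.countP (fun kv => kv.1 != kv.2) : Int) := by
  induction l with
  | nil => intro st; simp
  | cons kv rest ih =>
      intro st
      rw [List.foldl_cons, ih, List.countP_cons]
      unfold loopA
      by_cases h1 : kv.1 = kv.2
      · simp [h1]
      · by_cases h2 : m.get? kv.2 = some kv.1
        · simp [h1, h2]; omega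
        · simp [h1, h2]; omega

theorem loopA_two (m : PySem.Dict Char Char) (l : List (Char × Char)) :
    ∀ st : PyDS × Int × Int,
      (l.foldl (loopA m) st).2.1
        = st.2.1 + (l.countP (fun kv => kv.1 != kv.2 && m.get? kv.2 == some kv.1) : Int) := by
  induction l with
  | nil => intro st; simp
  | cons kv rest ih =>
      intro st
      rw [List.foldl_cons, ih, List.countP_cons]
      unfold loopA
      by_cases h1 : kv.1 = kv.2
      · simp [h1]
      · by_cases h2 : m.get? kv.2 = some kv.1
        · simp [h1, h2]; omega
        · simp [h1, h2]

theorem loopA_ds (m : PySem.Dict Char Char) (l : List (Char × Char)) :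
    ∀ st : PyDS × Int × Int,
      (l.foldl (loopA m) st).1
        = (l.filter (fun kv => kv.1 != kv.2 && m.get? kv.2 != some kv.1)).foldl
            (fun ds kv => dsAdd ds kv.1 kv.2) st.1 := by
  induction l with
  | nil => intro st; simp
  | cons kv rest ih =>
      intro st
      rw [List.foldl_cons, ih, List.filter_cons]
      unfold loopA
      by_cases h1 : kv.1 = kv.2
      · simp [h1]
      · by_cases h2 : m.get? kv.2 = some kv.1
        · simp [h1, h2]
        · simp [h1, h2]

-- ---- generic association-list / multiset surgery lemmas used by the simulation ----

theorem dict_get?_erase {ν : Type} (d : PySem.Dict Char ν) (k j : Char) :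
    (d.erase k).get? j = if j = k then none else d.get? j := by
  obtain ⟨its⟩ := d
  simp only [PySem.Dict.erase, PySem.Dict.get?]
  by_cases hjk : j = k
  · subst hjk
    rw [if_pos rfl]
    have hfn : List.find? (fun p => p.1 == j) (its.filter (fun p => !(p.1 == j))) = none := by
      rw [List.find?_eq_none]
      intro x hx
      simpa using (List.mem_filter.mp hx).2
    rw [hfn]; rfl
  · rw [if_neg hjk]
    induction its with
    | nil => rfl
    | cons r rest ih =>
        by_cases hrk : r.1 = k
        · have h1 : (r.1 == k) = true := by simp [hrk]
          have h2 : (r.1 == j) = false :=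
            beq_eq_false_iff_ne.mpr (by rw [hrk]; exact fun h => hjk h.symm)
          simp only [List.filter_cons, h1, Bool.not_true, Bool.false_eq_true, if_false]
          rw [List.find?_cons_of_neg (by simp [h2])]
          exact ih
        · have h1 : (r.1 == k) = false := beq_eq_false_iff_ne.mpr hrk
          by_cases hrj : r.1 = j
          · have h2 : (r.1 == j) = true := by simp [hrj]
            simp only [List.filter_cons, h1, Bool.not_false]
            rw [if_pos trivial, List.find?_cons_of_pos (by simp [h2]), List.find?_cons_of_pos (by simp [h2])]
          · have h2 : (r.1 == j) = false := beq_eq_false_iff_ne.mpr hrj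
            simp only [List.filter_cons, h1, Bool.not_false]
            rw [if_pos trivial, List.find?_cons_of_neg (by simp [h2]), List.find?_cons_of_neg (by simp [h2])]
            exact ih

theorem dict_nodup_keys_erase {ν : Type} (d : PySem.Dict Char ν) (k : Char)
    (h : d.keys.Nodup) : (d.erase k).keys.Nodup := by
  have hsub : (d.erase k).items.Sublist d.items := by
    simpa [PySem.Dict.erase] using List.filter_sublist (l := d.items) (p := fun p => !(p.1 == k))
  have : ((d.erase k).items.map Prod.fst).Sublist (d.items.map Prod.fst) := hsub.map _
  exact List.Nodup.sublist this h

theorem get?_foldl_insert_const (xs : List Char) (L : PySem.Dict Char Char) (c a : Char) :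
    (xs.foldl (fun L k => L.insert k c) L).get? a
      = if a ∈ xs then some c else L.get? a := by
  induction xs generalizing L with
  | nil => simp
  | cons x rest ih =>
      rw [List.foldl_cons, ih]
      by_cases hmem : a ∈ rest
      · simp [hmem]
      · by_cases hax : a = x
        · simp [hmem, hax, PySem.Dict.get?_insert_self]
        · simp [hmem, hax, PySem.Dict.get?_insert_of_ne _ _ hax]

theorem dict_decomp {ν : Type} (d : PySem.Dict Char ν) (k : Char) (s : ν)
    (hnd : d.keys.Nodup) (h : d.get? k = some s) :
    ∃ p q, d.items = p ++ (k, s) :: q ∧ (∀ r ∈ p, r.1 ≠ k) ∧ (∀ r ∈ q, r.1 ≠ k) := by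
  have hmem : (k, s) ∈ d.items := PySem.Dict.mem_items_of_get?_eq_some _ h
  obtain ⟨p, q, hpq⟩ := List.append_of_mem hmem
  have hkeys : d.keys = p.map Prod.fst ++ k :: q.map Prod.fst := by
    simp [PySem.Dict.keys, hpq]
  rw [hkeys] at hnd
  rcases List.nodup_append.mp hnd with ⟨h1, h2, h3⟩
  refine ⟨p, q, hpq, ?_, ?_⟩
  · intro r hr hrk
    exact h3 r.1 (List.mem_map_of_mem hr) k List.mem_cons_self hrk
  · intro r hr hrk
    exact (List.nodup_cons.mp h2).1 (hrk ▸ List.mem_map_of_mem (f := Prod.fst) hr)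

theorem values_insert_existing {ν : Type} [DecidableEq ν] (d : PySem.Dict Char ν) (k : Char)
    (s w : ν) (hnd : d.keys.Nodup) (h : d.get? k = some s) :
    ((d.insert k w).values : Multiset ν) = w ::ₘ (↑d.values : Multiset ν).erase s := by
  obtain ⟨p, q, hpq, hp, hq⟩ := dict_decomp d k s hnd h
  have hc : d.contains k = true := by
    rw [PySem.Dict.contains_eq_isSome_get?, h]; rfl
  have hins : (d.insert k w).items = p ++ (k, w) :: q := by
    rw [PySem.Dict.items_insert_of_contains _ _ hc, hpq]
    simp only [List.map_append, List.map_cons, beq_self_eq_true, if_true]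
    congr 1
    · have hid : ∀ r ∈ p, (if (r.1 == k) = true then (k, w) else r) = id r := fun r hr => by
        have : (r.1 == k) = false := beq_eq_false_iff_ne.mpr (hp r hr)
        simp [this]
      rw [List.map_congr_left hid, List.map_id]
    · congr 1
      have hid : ∀ r ∈ q, (if (r.1 == k) = true then (k, w) else r) = id r := fun r hr => by
        have : (r.1 == k) = false := beq_eq_false_iff_ne.mpr (hq r hr)
        simp [this]
      rw [List.map_congr_left hid, List.map_id]
  have hv1 : (d.insert k w).values = p.map Prod.snd ++ w :: q.map Prod.snd := by
    simp [PySem.Dict.values, hins]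
  have hv0 : d.values = p.map Prod.snd ++ s :: q.map Prod.snd := by
    simp [PySem.Dict.values, hpq]
  rw [hv1, hv0]
  rw [Multiset.coe_eq_coe.mpr List.perm_middle, Multiset.coe_eq_coe.mpr List.perm_middle]
  simp [Multiset.erase_cons_head]

theorem values_erase_existing {ν : Type} [DecidableEq ν] (d : PySem.Dict Char ν) (k : Char)
    (s : ν) (hnd : d.keys.Nodup) (h : d.get? k = some s) :
    ((d.erase k).values : Multiset ν) = (↑d.values : Multiset ν).erase s := by
  obtain ⟨p, q, hpq, hp, hq⟩ := dict_decomp d k s hnd h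
  have hers : (d.erase k).items = p ++ q := by
    simp only [PySem.Dict.erase, hpq, List.filter_append, List.filter_cons,
      beq_self_eq_true, Bool.not_true]
    rw [List.filter_eq_self.mpr (fun r hr => by
          simp [beq_eq_false_iff_ne.mpr (hp r hr)]),
        List.filter_eq_self.mpr (fun r hr => by
          simp [beq_eq_false_iff_ne.mpr (hq r hr)])]
    simp
  have hv1 : (d.erase k).values = p.map Prod.snd ++ q.map Prod.snd := by
    simp [PySem.Dict.values, hers]
  have hv0 : d.values = p.map Prod.snd ++ s :: q.map Prod.snd := by
    simp [PySem.Dict.values, hpq]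
  rw [hv1, hv0, Multiset.coe_eq_coe.mpr List.perm_middle]
  simp [Multiset.erase_cons_head]

theorem values_insert_fresh {ν : Type} (d : PySem.Dict Char ν) (k : Char) (w : ν)
    (h : d.contains k = false) : (d.insert k w).values = d.values ++ [w] := by
  simp [PySem.Dict.values, PySem.Dict.items_insert_of_not_contains _ _ h]

theorem values_mem_get? {ν : Type} (d : PySem.Dict Char ν) (hnd : d.keys.Nodup)
    (s : ν) (h : s ∈ d.values) : ∃ l, d.get? l = some s := by
  simp only [PySem.Dict.values, List.mem_map] at h
  obtain ⟨⟨l, s'⟩, hmem, hs⟩ := h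
  subst hs
  exact ⟨l, PySem.Dict.get?_of_mem_items _ hmem hnd⟩

theorem toMultiset_eraseIdx {α : Type} [DecidableEq α] (l : List α) (i : Nat)
    (h : i < l.length) : ((l.eraseIdx i : List α) : Multiset α) = (↑l : Multiset α).erase l[i] := by
  induction l generalizing i with
  | nil => simp at h
  | cons a t ih =>
      cases i with
      | zero => simp
      | succ j =>
          have hj : j < t.length := by simpa using h
          by_cases hta : t[j] = a
          · simp only [List.eraseIdx_cons_succ, List.getElem_cons_succ, hta]
            rw [show ((a :: t.eraseIdx j : List α) : Multiset α) = a ::ₘ ↑(t.eraseIdx j) from rfl,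
              ih j hj, hta]
            rw [show ((a :: t : List α) : Multiset α) = a ::ₘ ↑t from rfl]
            rw [Multiset.erase_cons_head]
            rw [Multiset.cons_erase (by rw [← hta]; exact List.getElem_mem hj)]
          · simp only [List.eraseIdx_cons_succ, List.getElem_cons_succ]
            rw [show ((a :: t.eraseIdx j : List α) : Multiset α) = a ::ₘ ↑(t.eraseIdx j) from rfl,
              ih j hj,
              show ((a :: t : List α) : Multiset α) = a ::ₘ ↑t from rfl,
              Multiset.erase_cons_tail _ (by exact fun hh => hta (by simp [hh]))]

theorem toMultiset_set {α : Type} [DecidableEq α] (l : List α) (i : Nat) (v : α)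
    (h : i < l.length) : ((l.set i v : List α) : Multiset α) = v ::ₘ (↑l : Multiset α).erase l[i] := by
  rw [Multiset.coe_eq_coe.mpr (List.set_perm_cons_eraseIdx h v)]
  rw [show ((v :: l.eraseIdx i : List α) : Multiset α) = v ::ₘ ↑(l.eraseIdx i) from rfl,
    toMultiset_eraseIdx l i h]

theorem multiset_map_erase {α β : Type} [DecidableEq α] [DecidableEq β] (f : α → β)
    (t : Multiset α) (s : α) (h : s ∈ t) :
    Multiset.map f (t.erase s) = (Multiset.map f t).erase (f s) := by
  conv_rhs => rw [← Multiset.cons_erase h]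
  simp [Multiset.erase_cons_head]

theorem mem_erase_of_nodup {α : Type} [DecidableEq α] (l : Multiset α) (a x : α)
    (hnd : l.Nodup) : x ∈ l.erase a ↔ x ∈ l ∧ x ≠ a := by
  rw [hnd.mem_erase_iff]; tauto

-- ---- the simulation invariant between the DisjointSet and the component list ----

def FS (G : PySem.Dict Char (PySem.Set Char)) : List (Finset Char) := G.values.map List.toFinset
def FB (comps : List (List Char)) : List (Finset Char) := comps.map List.toFinset

structure AInv (ds : PyDS) : Prop where
  gnodup : ds.group.keys.Nodup
  vnodup : ∀ l s, ds.group.get? l = some s → s.Nodup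
  leadmem : ∀ l s, ds.group.get? l = some s → l ∈ s
  back : ∀ l s, ds.group.get? l = some s → ∀ a ∈ s, ds.leader.get? a = some l
  memiff : ∀ a l, ds.leader.get? a = some l → ∃ s, ds.group.get? l = some s ∧ a ∈ s

structure BInv (comps : List (List Char)) : Prop where
  cuniq : comps.Nodup
  cnodup : ∀ c ∈ comps, c.Nodup
  cne : ∀ c ∈ comps, c ≠ []
  cdisj : ∀ c ∈ comps, ∀ d ∈ comps, c ≠ d → ∀ x ∈ c, x ∉ d

structure DSInv (ds : PyDS) (comps : List (List Char)) : Prop where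
  a : AInv ds
  b : BInv comps
  ms : (FS ds.group : Multiset (Finset Char)) = (FB comps : Multiset (Finset Char))

theorem values_of_get? {ν : Type} (d : PySem.Dict Char ν) (l : Char) (s : ν)
    (h : d.get? l = some s) : s ∈ d.values := by
  have := PySem.Dict.mem_items_of_get?_eq_some _ h
  simpa [PySem.Dict.values] using List.mem_map_of_mem (f := Prod.snd) this

theorem inv_comp_uniq {ds : PyDS} {comps : List (List Char)} (h : DSInv ds comps) :
    ∀ c ∈ comps, ∀ d ∈ comps, ∀ x, x ∈ c → x ∈ d → c = d := by
  intro c hc d hd x hxc hxd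
  by_contra hne
  exact h.b.cdisj c hc d hd hne x hxc hxd

theorem inv_fin_mem {ds : PyDS} {comps : List (List Char)} (h : DSInv ds comps) (S : Finset Char) :
    (∃ s ∈ ds.group.values, s.toFinset = S) ↔ (∃ c ∈ comps, c.toFinset = S) := by
  have hms := h.ms
  constructor
  · rintro ⟨s, hs, rfl⟩
    have hmem : s.toFinset ∈ (↑(FB comps) : Multiset (Finset Char)) := by
      rw [← hms]
      exact Multiset.mem_coe.mpr (List.mem_map_of_mem hs)
    obtain ⟨c, hc, hcs⟩ := List.mem_map.mp (Multiset.mem_coe.mp hmem)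
    exact ⟨c, hc, hcs⟩
  · rintro ⟨c, hc, rfl⟩
    have hmem : c.toFinset ∈ (↑(FS ds.group) : Multiset (Finset Char)) := by
      rw [hms]
      exact Multiset.mem_coe.mpr (List.mem_map_of_mem hc)
    obtain ⟨s, hs, hcs⟩ := List.mem_map.mp (Multiset.mem_coe.mp hmem)
    exact ⟨s, hs, hcs⟩

theorem findComp_none_iff (comps : List (List Char)) (x : Char) :
    findComp comps x = none ↔ ∀ c ∈ comps, x ∉ c := by
  unfold findComp
  rw [List.findIdx?_eq_none_iff]
  constructor
  · intro h c hc hx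
    have := h c hc
    simp [List.contains_iff_mem] at this
    exact this hx
  · intro h c hc
    simpa [List.contains_iff_mem] using h c hc

theorem findComp_some (comps : List (List Char)) (x : Char) (i : Nat)
    (h : findComp comps x = some i) : ∃ hi : i < comps.length, x ∈ comps[i] := by
  unfold findComp at h
  obtain ⟨hi, hp, _⟩ := List.findIdx?_eq_some_iff_getElem.mp h
  refine ⟨hi, ?_⟩
  simpa [List.contains_iff_mem] using hp

theorem inv_memB_of_leader {ds : PyDS} {comps : List (List Char)} (h : DSInv ds comps)
    {x l : Char} (hx : ds.leader.get? x = some l) : ∃ c ∈ comps, x ∈ c := by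
  obtain ⟨s, hgs, hxs⟩ := h.a.memiff x l hx
  obtain ⟨c, hc, hcs⟩ := (inv_fin_mem h s.toFinset).mp ⟨s, values_of_get? _ _ _ hgs, rfl⟩
  refine ⟨c, hc, ?_⟩
  rw [← List.mem_toFinset, hcs, List.mem_toFinset]
  exact hxs

theorem inv_leader_of_memB {ds : PyDS} {comps : List (List Char)} (h : DSInv ds comps)
    {x : Char} {c : List Char} (hc : c ∈ comps) (hx : x ∈ c) :
    ∃ l, ds.leader.get? x = some l := by
  obtain ⟨s, hs, hcs⟩ := (inv_fin_mem h c.toFinset).mpr ⟨c, hc, rfl⟩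
  obtain ⟨l, hl⟩ := values_mem_get? ds.group h.a.gnodup s hs
  refine ⟨l, h.a.back l s hl x ?_⟩
  rw [← List.mem_toFinset, hcs, List.mem_toFinset]
  exact hx

theorem inv_leader_none_iff {ds : PyDS} {comps : List (List Char)} (h : DSInv ds comps)
    (x : Char) : ds.leader.get? x = none ↔ findComp comps x = none := by
  constructor
  · intro hn
    rw [findComp_none_iff]
    intro c hc hx
    obtain ⟨l, hl⟩ := inv_leader_of_memB h hc hx
    rw [hn] at hl; cases hl
  · intro hn
    cases hl : ds.leader.get? x with
    | none => rfl
    | some l =>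
        obtain ⟨c, hc, hx⟩ := inv_memB_of_leader h hl
        exact absurd hx ((findComp_none_iff comps x).mp hn c hc)

theorem inv_corr {ds : PyDS} {comps : List (List Char)} (h : DSInv ds comps)
    {k l : Char} {s : PySem.Set Char} {i : Nat}
    (hl : ds.leader.get? k = some l) (hs : ds.group.get? l = some s)
    (hi : findComp comps k = some i) (hilen : i < comps.length) :
    s.toFinset = comps[i].toFinset := by
  obtain ⟨s', hs', hks'⟩ := h.a.memiff k l hl
  rw [hs] at hs'
  obtain rfl := Option.some.inj hs'
  obtain ⟨c, hc, hcs⟩ := (inv_fin_mem h s.toFinset).mp ⟨s, values_of_get? _ _ _ hs, rfl⟩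
  obtain ⟨hlen, hkc⟩ := findComp_some comps k i hi
  have hkc' : k ∈ c := by
    rw [← List.mem_toFinset, hcs, List.mem_toFinset]; exact hks'
  have : c = comps[i] := inv_comp_uniq h c hc comps[i] (List.getElem_mem hilen) k hkc' hkc
  rw [← hcs, this]

theorem inv_eq_iff {ds : PyDS} {comps : List (List Char)} (h : DSInv ds comps)
    {k v la lb : Char} {ia ib : Nat}
    (hla : ds.leader.get? k = some la) (hlb : ds.leader.get? v = some lb)
    (hia : findComp comps k = some ia) (hib : findComp comps v = some ib) :
    (la = lb ↔ ia = ib) := by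
  obtain ⟨sa, hsa, hka⟩ := h.a.memiff k la hla
  obtain ⟨sb, hsb, hvb⟩ := h.a.memiff v lb hlb
  obtain ⟨hialen, hkia⟩ := findComp_some comps k ia hia
  obtain ⟨hiblen, hvib⟩ := findComp_some comps v ib hib
  have hca := inv_corr h hla hsa hia hialen
  have hcb := inv_corr h hlb hsb hib hiblen
  constructor
  · intro heq
    subst heq
    rw [hsa] at hsb
    obtain rfl := Option.some.inj hsb
    have hvia : v ∈ comps[ia] := by
      rw [← List.mem_toFinset, ← hca, List.mem_toFinset]; exact hvb
    have := inv_comp_uniq h comps[ia] (List.getElem_mem hialen) comps[ib]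
      (List.getElem_mem hiblen) v hvia hvib
    exact (List.Nodup.getElem_inj_iff h.b.cuniq).mp this
  · intro heq
    subst heq
    have hvsa : v ∈ sa := by
      rw [← List.mem_toFinset, hca, List.mem_toFinset]
      exact hvib
    have := h.a.back la sa hsa v hvsa
    rw [hlb] at this
    exact (Option.some.inj this).symm

theorem ainv_gdisj {ds : PyDS} (h : AInv ds) :
    ∀ l1 s1 l2 s2, ds.group.get? l1 = some s1 → ds.group.get? l2 = some s2 → l1 ≠ l2 →
      ∀ x ∈ s1, x ∉ s2 := by
  intro l1 s1 l2 s2 h1 h2 hne x hx1 hx2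
  have e1 := h.back l1 s1 h1 x hx1
  have e2 := h.back l2 s2 h2 x hx2
  rw [e1] at e2
  exact hne (Option.some.inj e2)

theorem binv_uniq {comps : List (List Char)} (h : BInv comps) :
    ∀ c ∈ comps, ∀ d ∈ comps, ∀ x, x ∈ c → x ∈ d → c = d := by
  intro c hc d hd x hxc hxd
  by_contra hne
  exact h.cdisj c hc d hd hne x hxc hxd

-- ---- reduction equations for the two step functions ----

theorem dsAdd_nn (ds : PyDS) (a b : Char) (h1 : ds.leader.get? a = none)
    (h2 : ds.leader.get? b = none) :
    dsAdd ds a b = ⟨(ds.leader.insert a a).insert b a,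
                    ds.group.insert a (PySem.Set.ofList [a, b])⟩ := by
  simp [dsAdd, h1, h2]

theorem dsAdd_sn (ds : PyDS) (a b la : Char) (h1 : ds.leader.get? a = some la)
    (h2 : ds.leader.get? b = none) :
    dsAdd ds a b = ⟨ds.leader.insert b la,
                    ds.group.modify la PySem.Set.empty (fun s => PySem.Set.add s b)⟩ := by
  simp [dsAdd, h1, h2]

theorem dsAdd_ns (ds : PyDS) (a b lb : Char) (h1 : ds.leader.get? a = none)
    (h2 : ds.leader.get? b = some lb) :
    dsAdd ds a b = ⟨ds.leader.insert a lb,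
                    ds.group.modify lb PySem.Set.empty (fun s => PySem.Set.add s a)⟩ := by
  simp [dsAdd, h1, h2]

theorem dsAdd_ss_eq (ds : PyDS) (a b la : Char) (h1 : ds.leader.get? a = some la)
    (h2 : ds.leader.get? b = some la) : dsAdd ds a b = ds := by
  simp [dsAdd, h1, h2]

theorem dsAdd_merge_noswap (ds : PyDS) (a b la lb : Char) (ga gb : PySem.Set Char)
    (h1 : ds.leader.get? a = some la) (h2 : ds.leader.get? b = some lb) (hne : la ≠ lb)
    (hga : ds.group.get? la = some ga) (hgb : ds.group.get? lb = some gb)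
    (hlen : ¬ (PySem.Set.len ga < PySem.Set.len gb)) :
    dsAdd ds a b = ⟨gb.foldl (fun L k => L.insert k la) ds.leader,
                    (ds.group.insert la (PySem.Set.union ga gb)).erase lb⟩ := by
  simp [dsAdd, h1, h2, hne, PySem.Dict.getD_of_get?_eq_some _ _ hga,
    PySem.Dict.getD_of_get?_eq_some _ _ hgb,
    show ¬ (List.length ga < List.length gb) by simpa [PySem.Set.len] using hlen]

theorem dsAdd_merge_swap (ds : PyDS) (a b la lb : Char) (ga gb : PySem.Set Char)
    (h1 : ds.leader.get? a = some la) (h2 : ds.leader.get? b = some lb) (hne : la ≠ lb)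
    (hga : ds.group.get? la = some ga) (hgb : ds.group.get? lb = some gb)
    (hlen : PySem.Set.len ga < PySem.Set.len gb) :
    dsAdd ds a b = ⟨ga.foldl (fun L k => L.insert k lb) ds.leader,
                    (ds.group.insert lb (PySem.Set.union gb ga)).erase la⟩ := by
  simp [dsAdd, h1, h2, hne, PySem.Dict.getD_of_get?_eq_some _ _ hga,
    PySem.Dict.getD_of_get?_eq_some _ _ hgb,
    show List.length ga < List.length gb by simpa [PySem.Set.len] using hlen]

theorem mergeStep_nn (comps : List (List Char)) (k v : Char)
    (h1 : findComp comps k = none) (h2 : findComp comps v = none) :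
    mergeStep comps (k, v) = comps ++ [[k, v]] := by
  simp [mergeStep, h1, h2]

theorem mergeStep_sn (comps : List (List Char)) (k v : Char) (ia : Nat)
    (h1 : findComp comps k = some ia) (h2 : findComp comps v = none) :
    mergeStep comps (k, v) = comps.modify ia (fun c => c ++ [v]) := by
  simp [mergeStep, h1, h2]

theorem mergeStep_ns (comps : List (List Char)) (k v : Char) (ib : Nat)
    (h1 : findComp comps k = none) (h2 : findComp comps v = some ib) :
    mergeStep comps (k, v) = comps.modify ib (fun c => c ++ [k]) := by
  simp [mergeStep, h1, h2]

theorem mergeStep_ss_eq (comps : List (List Char)) (k v : Char) (ia : Nat)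
    (h1 : findComp comps k = some ia) (h2 : findComp comps v = some ia) :
    mergeStep comps (k, v) = comps := by
  simp [mergeStep, h1, h2]

theorem mergeStep_ss_ne (comps : List (List Char)) (k v : Char) (ia ib : Nat)
    (h1 : findComp comps k = some ia) (h2 : findComp comps v = some ib) (hne : ia ≠ ib)
    (hlen : ib < comps.length) :
    mergeStep comps (k, v)
      = (comps.modify ia (fun c => c ++ comps[ib])).eraseIdx ib := by
  simp [mergeStep, h1, h2, hne, List.getD_eq_getElem?_getD, hlen]

-- ---- the six case lemmas ----

theorem a_new (ds : PyDS) (k v : Char) (hkv : k ≠ v) (h : AInv ds)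
    (hLa : ds.leader.get? k = none) (hLb : ds.leader.get? v = none) :
    AInv ⟨(ds.leader.insert k k).insert v k, ds.group.insert k (PySem.Set.ofList [k, v])⟩ ∧
    FS (ds.group.insert k (PySem.Set.ofList [k, v])) = FS ds.group ++ [[k, v].toFinset] := by
  have hGk : ds.group.get? k = none := by
    cases hg : ds.group.get? k with
    | none => rfl
    | some s =>
        have := h.back k s hg k (h.leadmem k s hg)
        rw [hLa] at this; cases this
  have hck : ds.group.contains k = false := by
    rw [PySem.Dict.contains_eq_isSome_get?, hGk]; rfl
  have hnoS : ∀ l s, ds.group.get? l = some s → k ∉ s ∧ v ∉ s := by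
    intro l s hg
    constructor <;> intro hx
    · have := h.back l s hg k hx; rw [hLa] at this; cases this
    · have := h.back l s hg v hx; rw [hLb] at this; cases this
  have hset : PySem.Set.ofList [k, v] = [k, v] :=
    PySem.Set.ofList_eq_self_of_nodup _ (by simp [hkv])
  have hLk : ((ds.leader.insert k k).insert v k).get? k = some k := by
    rw [PySem.Dict.get?_insert_of_ne _ _ hkv, PySem.Dict.get?_insert_self]
  have hLv : ((ds.leader.insert k k).insert v k).get? v = some k :=
    PySem.Dict.get?_insert_self _ _ _
  have hLo : ∀ a, a ≠ k → a ≠ v →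
      ((ds.leader.insert k k).insert v k).get? a = ds.leader.get? a := by
    intro a hak hav
    rw [PySem.Dict.get?_insert_of_ne _ _ hav, PySem.Dict.get?_insert_of_ne _ _ hak]
  refine ⟨⟨?_, ?_, ?_, ?_, ?_⟩, ?_⟩
  · exact PySem.Dict.nodup_keys_insert _ _ _ h.gnodup
  · intro l s hg
    rw [PySem.Dict.get?_insert] at hg
    by_cases hlk : l = k
    · rw [if_pos hlk] at hg
      obtain rfl := Option.some.inj hg
      rw [hset]
      simp [hkv]
    · rw [if_neg hlk] at hg
      exact h.vnodup l s hg
  · intro l s hg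
    rw [PySem.Dict.get?_insert] at hg
    by_cases hlk : l = k
    · rw [if_pos hlk] at hg
      obtain rfl := Option.some.inj hg
      subst hlk
      rw [PySem.Set.mem_ofList]
      simp
    · rw [if_neg hlk] at hg
      exact h.leadmem l s hg
  · intro l s hg a ha
    rw [PySem.Dict.get?_insert] at hg
    by_cases hlk : l = k
    · rw [if_pos hlk] at hg
      obtain rfl := Option.some.inj hg
      subst hlk
      rw [PySem.Set.mem_ofList] at ha
      rcases List.mem_pair.mp ha with rfl | rfl
      · exact hLk
      · exact hLv
    · rw [if_neg hlk] at hg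
      obtain ⟨hks, hvs⟩ := hnoS l s hg
      rw [hLo a (fun hh => hks (hh ▸ ha)) (fun hh => hvs (hh ▸ ha))]
      exact h.back l s hg a ha
  · intro a l hl
    by_cases hav : a = v
    · rw [hav, hLv] at hl
      have hlk2 : l = k := (Option.some.inj hl).symm
      subst hlk2
      refine ⟨PySem.Set.ofList [l, v], PySem.Dict.get?_insert_self _ _ _, ?_⟩
      rw [PySem.Set.mem_ofList, hav]; simp
    · by_cases hak : a = k
      · subst hak
        rw [hLk] at hl
        have hlk2 : l = a := (Option.some.inj hl).symm
        subst hlk2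
        refine ⟨PySem.Set.ofList [l, v], PySem.Dict.get?_insert_self _ _ _, ?_⟩
        rw [PySem.Set.mem_ofList]; simp
      · rw [hLo a hak hav] at hl
        obtain ⟨s, hs, has⟩ := h.memiff a l hl
        have hlk : l ≠ k := by
          intro hh; rw [hh, hGk] at hs; cases hs
        refine ⟨s, ?_, has⟩
        rw [PySem.Dict.get?_insert, if_neg hlk]
        exact hs
  · unfold FS
    rw [values_insert_fresh _ _ _ hck, List.map_append, hset]
    rfl

theorem b_new (comps : List (List Char)) (k v : Char) (hkv : k ≠ v) (h : BInv comps)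
    (hk : ∀ c ∈ comps, k ∉ c) (hv : ∀ c ∈ comps, v ∉ c) :
    BInv (comps ++ [[k, v]]) ∧ FB (comps ++ [[k, v]]) = FB comps ++ [[k, v].toFinset] := by
  refine ⟨⟨?_, ?_, ?_, ?_⟩, ?_⟩
  · rw [List.nodup_append]
    exact ⟨h.cuniq, by simp, fun a ha b hb => by
      simp only [List.mem_singleton] at hb
      subst hb
      exact fun hh => hk a ha (hh ▸ by simp)⟩
  · intro c hc
    rcases List.mem_append.mp hc with hc | hc
    · exact h.cnodup c hc
    · simp only [List.mem_singleton] at hc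
      subst hc; simp [hkv]
  · intro c hc
    rcases List.mem_append.mp hc with hc | hc
    · exact h.cne c hc
    · simp only [List.mem_singleton] at hc
      subst hc; simp
  · intro c hc d hd hcd x hxc hxd
    rcases List.mem_append.mp hc with hc1 | hc1 <;> rcases List.mem_append.mp hd with hd1 | hd1
    · exact h.cdisj c hc1 d hd1 hcd x hxc hxd
    · have hd2 : d = [k, v] := List.mem_singleton.mp hd1
      rw [hd2] at hxd
      rcases List.mem_pair.mp hxd with he | he
      · exact hk c hc1 (he ▸ hxc)
      · exact hv c hc1 (he ▸ hxc)
    · have hc2 : c = [k, v] := List.mem_singleton.mp hc1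
      rw [hc2] at hxc
      rcases List.mem_pair.mp hxc with he | he
      · exact hk d hd1 (he ▸ hxd)
      · exact hv d hd1 (he ▸ hxd)
    · have hc2 : c = [k, v] := List.mem_singleton.mp hc1
      have hd2 : d = [k, v] := List.mem_singleton.mp hd1
      exact absurd (hc2.trans hd2.symm) hcd
  · unfold FB
    rw [List.map_append]
    rfl

theorem a_ext (ds : PyDS) (lw u : Char) (gw : PySem.Set Char) (h : AInv ds)
    (hw : ds.group.get? lw = some gw) (hu : ds.leader.get? u = none) :
    AInv ⟨ds.leader.insert u lw,
          ds.group.modify lw PySem.Set.empty (fun s => PySem.Set.add s u)⟩ ∧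
    (↑(FS (ds.group.modify lw PySem.Set.empty (fun s => PySem.Set.add s u))) : Multiset (Finset Char))
      = (gw.toFinset ∪ {u}) ::ₘ (↑(FS ds.group) : Multiset (Finset Char)).erase gw.toFinset := by
  have hnoval : ∀ l s, ds.group.get? l = some s → u ∉ s := by
    intro l s hg hx
    have := h.back l s hg u hx
    rw [hu] at this; cases this
  have hugw : u ∉ gw := hnoval lw gw hw
  have hmod : ds.group.modify lw PySem.Set.empty (fun s => PySem.Set.add s u)
      = ds.group.insert lw (gw ++ [u]) := by
    show ds.group.insert lw ((ds.group.getD lw PySem.Set.empty).add u) = _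
    rw [PySem.Dict.getD_of_get?_eq_some _ _ hw, PySem.Set.add_of_not_mem hugw]
  rw [hmod]
  have hLu : (ds.leader.insert u lw).get? u = some lw := PySem.Dict.get?_insert_self _ _ _
  have hLo : ∀ a, a ≠ u → (ds.leader.insert u lw).get? a = ds.leader.get? a :=
    fun a ha => PySem.Dict.get?_insert_of_ne _ _ ha
  refine ⟨⟨?_, ?_, ?_, ?_, ?_⟩, ?_⟩
  · exact PySem.Dict.nodup_keys_insert _ _ _ h.gnodup
  · intro l s hg
    rw [PySem.Dict.get?_insert] at hg
    by_cases hl : l = lw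
    · rw [if_pos hl] at hg
      obtain rfl := Option.some.inj hg
      rw [List.nodup_append]
      exact ⟨h.vnodup lw gw hw, by simp, fun a ha b hb => by
        simp only [List.mem_singleton] at hb
        subst hb
        exact fun hh => hugw (hh ▸ ha)⟩
    · rw [if_neg hl] at hg
      exact h.vnodup l s hg
  · intro l s hg
    rw [PySem.Dict.get?_insert] at hg
    by_cases hl : l = lw
    · rw [if_pos hl] at hg
      obtain rfl := Option.some.inj hg
      rw [hl]
      exact List.mem_append_left _ (h.leadmem lw gw hw)
    · rw [if_neg hl] at hg
      exact h.leadmem l s hg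
  · intro l s hg a ha
    rw [PySem.Dict.get?_insert] at hg
    by_cases hl : l = lw
    · rw [if_pos hl] at hg
      obtain rfl := Option.some.inj hg
      rcases List.mem_append.mp ha with ha | ha
      · have hau : a ≠ u := fun hh => hugw (hh ▸ ha)
        rw [hLo a hau, hl]
        exact h.back lw gw hw a ha
      · have hau : a = u := List.mem_singleton.mp ha
        rw [hau, hl]
        exact hLu
    · rw [if_neg hl] at hg
      have hau : a ≠ u := fun hh => hnoval l s hg (hh ▸ ha)
      rw [hLo a hau]
      exact h.back l s hg a ha
  · intro a l hl
    by_cases hau : a = u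
    · rw [hau, hLu] at hl
      have hllw : l = lw := (Option.some.inj hl).symm
      subst hllw
      refine ⟨gw ++ [u], by rw [PySem.Dict.get?_insert, if_pos rfl], ?_⟩
      rw [hau]
      exact List.mem_append_right _ (by simp)
    · rw [hLo a hau] at hl
      obtain ⟨s, hs, has⟩ := h.memiff a l hl
      by_cases hl2 : l = lw
      · subst hl2
        rw [hw] at hs
        obtain rfl := Option.some.inj hs
        exact ⟨gw ++ [u], by rw [PySem.Dict.get?_insert, if_pos rfl], List.mem_append_left _ has⟩
      · exact ⟨s, by rw [PySem.Dict.get?_insert, if_neg hl2]; exact hs, has⟩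
  · have hVins := values_insert_existing ds.group lw gw (gw ++ [u]) h.gnodup hw
    unfold FS
    rw [← Multiset.map_coe, ← Multiset.map_coe, hVins, Multiset.map_cons,
      multiset_map_erase List.toFinset _ gw (Multiset.mem_coe.mpr (values_of_get? _ _ _ hw))]
    congr 1
    rw [List.toFinset_append]
    simp

theorem b_ext (comps : List (List Char)) (i : Nat) (u : Char) (h : BInv comps)
    (hi : i < comps.length) (hu : ∀ c ∈ comps, u ∉ c) :
    BInv (comps.modify i (fun c => c ++ [u])) ∧
    (↑(FB (comps.modify i (fun c => c ++ [u]))) : Multiset (Finset Char))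
      = (comps[i].toFinset ∪ {u}) ::ₘ (↑(FB comps) : Multiset (Finset Char)).erase comps[i].toFinset := by
  have hmod : comps.modify i (fun c => c ++ [u]) = comps.set i (comps[i] ++ [u]) := by
    rw [List.modify_eq_set_get _ hi]
    rfl
  have hmsraw : (↑(comps.set i (comps[i] ++ [u])) : Multiset (List Char))
      = (comps[i] ++ [u]) ::ₘ (↑comps : Multiset (List Char)).erase comps[i] :=
    toMultiset_set comps i _ hi
  have hnodL : (↑comps : Multiset (List Char)).Nodup := Multiset.coe_nodup.mpr h.cuniq
  have hmem : ∀ c, c ∈ comps.set i (comps[i] ++ [u]) ↔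
      (c = comps[i] ++ [u] ∨ (c ∈ comps ∧ c ≠ comps[i])) := by
    intro c
    rw [← List.mem_toFinset]
    rw [show (comps.set i (comps[i] ++ [u])).toFinset = (comps.set i (comps[i] ++ [u])).toFinset from rfl]
    rw [List.mem_toFinset, ← Multiset.mem_coe, hmsraw, Multiset.mem_cons,
      mem_erase_of_nodup _ _ _ hnodL, Multiset.mem_coe]
  have hui : u ∉ comps[i] := hu _ (List.getElem_mem hi)
  rw [hmod]
  refine ⟨⟨?_, ?_, ?_, ?_⟩, ?_⟩
  · rw [← Multiset.coe_nodup, hmsraw, Multiset.nodup_cons]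
    refine ⟨?_, Multiset.Nodup.erase _ hnodL⟩
    intro hTm
    have : (comps[i] ++ [u]) ∈ comps := Multiset.mem_coe.mp (Multiset.mem_of_mem_erase hTm)
    exact hu _ this (by simp)
  · intro c hc
    rcases (hmem c).mp hc with rfl | ⟨hc1, _⟩
    · rw [List.nodup_append]
      exact ⟨h.cnodup _ (List.getElem_mem hi), by simp, fun a ha b hb => by
        simp only [List.mem_singleton] at hb
        subst hb
        exact fun hh => hui (hh ▸ ha)⟩
    · exact h.cnodup c hc1
  · intro c hc
    rcases (hmem c).mp hc with rfl | ⟨hc1, _⟩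
    · simp
    · exact h.cne c hc1
  · intro c hc d hd hcd x hxc hxd
    rcases (hmem c).mp hc with rfl | ⟨hc1, hc2⟩ <;> rcases (hmem d).mp hd with he | ⟨hd1, hd2⟩
    · exact absurd he.symm hcd
    · rcases List.mem_append.mp hxc with hx | hx
      · exact h.cdisj _ (List.getElem_mem hi) d hd1 (fun hh => hd2 hh.symm) x hx hxd
      · have : x = u := List.mem_singleton.mp hx
        exact hu d hd1 (this ▸ hxd)
    · rw [he] at hxd
      rcases List.mem_append.mp hxd with hx | hx
      · exact hc2 (binv_uniq h c hc1 comps[i] (List.getElem_mem hi) x hxc hx)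
      · have : x = u := List.mem_singleton.mp hx
        exact hu c hc1 (this ▸ hxc)
    · exact h.cdisj c hc1 d hd1 hcd x hxc hxd
  · unfold FB
    rw [List.map_set]
    have hlen2 : i < (comps.map List.toFinset).length := by simpa using hi
    rw [toMultiset_set _ i _ hlen2]
    congr 1
    · rw [List.toFinset_append]
      simp
    · congr 1
      rw [List.getElem_map]

theorem a_merge (ds : PyDS) (lx ly : Char) (gx gy : PySem.Set Char) (h : AInv ds)
    (hx : ds.group.get? lx = some gx) (hy : ds.group.get? ly = some gy) (hxy : lx ≠ ly) :
    AInv ⟨gy.foldl (fun L k => L.insert k lx) ds.leader,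
          (ds.group.insert lx (PySem.Set.union gx gy)).erase ly⟩ ∧
    (↑(FS ((ds.group.insert lx (PySem.Set.union gx gy)).erase ly)) : Multiset (Finset Char))
      = (gx.toFinset ∪ gy.toFinset) ::ₘ
        (((↑(FS ds.group) : Multiset (Finset Char)).erase gx.toFinset).erase gy.toFinset) := by
  have hdisj : ∀ x ∈ gx, x ∉ gy := ainv_gdisj h lx gx ly gy hx hy hxy
  have hlxgx : lx ∈ gx := h.leadmem lx gx hx
  have hlygy : ly ∈ gy := h.leadmem ly gy hy
  have hlxgy : lx ∉ gy := hdisj lx hlxgx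
  have hmemU : ∀ a, a ∈ PySem.Set.union gx gy ↔ a ∈ gx ∨ a ∈ gy := fun a =>
    PySem.Set.mem_update gx gy a
  have hG1nd : (ds.group.insert lx (PySem.Set.union gx gy)).keys.Nodup :=
    PySem.Dict.nodup_keys_insert _ _ _ h.gnodup
  have hG1ly : (ds.group.insert lx (PySem.Set.union gx gy)).get? ly = some gy := by
    rw [PySem.Dict.get?_insert_of_ne _ _ (Ne.symm hxy)]
    exact hy
  have hG' : ∀ j, ((ds.group.insert lx (PySem.Set.union gx gy)).erase ly).get? j
      = if j = ly then none else (ds.group.insert lx (PySem.Set.union gx gy)).get? j :=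
    fun j => dict_get?_erase _ ly j
  have hL' : ∀ a, (gy.foldl (fun L k => L.insert k lx) ds.leader).get? a
      = if a ∈ gy then some lx else ds.leader.get? a :=
    fun a => get?_foldl_insert_const gy ds.leader lx a
  refine ⟨⟨?_, ?_, ?_, ?_, ?_⟩, ?_⟩
  · exact dict_nodup_keys_erase _ _ hG1nd
  · intro l s hg
    rw [hG' l] at hg
    by_cases hly : l = ly
    · rw [if_pos hly] at hg; cases hg
    · rw [if_neg hly, PySem.Dict.get?_insert] at hg
      by_cases hlx : l = lx
      · rw [if_pos hlx] at hg
        obtain rfl := Option.some.inj hg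
        exact PySem.Set.nodup_union _ _ (h.vnodup lx gx hx)
      · rw [if_neg hlx] at hg
        exact h.vnodup l s hg
  · intro l s hg
    rw [hG' l] at hg
    by_cases hly : l = ly
    · rw [if_pos hly] at hg; cases hg
    · rw [if_neg hly, PySem.Dict.get?_insert] at hg
      by_cases hlx : l = lx
      · rw [if_pos hlx] at hg
        obtain rfl := Option.some.inj hg
        rw [hlx]
        exact (hmemU lx).mpr (Or.inl hlxgx)
      · rw [if_neg hlx] at hg
        exact h.leadmem l s hg
  · intro l s hg a ha
    rw [hG' l] at hg
    by_cases hly : l = ly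
    · rw [if_pos hly] at hg; cases hg
    · rw [if_neg hly, PySem.Dict.get?_insert] at hg
      by_cases hlx : l = lx
      · rw [if_pos hlx] at hg
        obtain rfl := Option.some.inj hg
        rcases (hmemU a).mp ha with hag | hag
        · have hagy : a ∉ gy := hdisj a hag
          rw [hL' a, if_neg hagy, hlx]
          exact h.back lx gx hx a hag
        · rw [hL' a, if_pos hag, hlx]
      · rw [if_neg hlx] at hg
        have hagy : a ∉ gy := fun hh => (ainv_gdisj h l s ly gy hg hy hly) a ha hh
        rw [hL' a, if_neg hagy]
        exact h.back l s hg a ha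
  · intro a l hl
    rw [hL' a] at hl
    by_cases hag : a ∈ gy
    · rw [if_pos hag] at hl
      have hlx2 : l = lx := (Option.some.inj hl).symm
      refine ⟨PySem.Set.union gx gy, ?_, (hmemU a).mpr (Or.inr hag)⟩
      rw [hG' l, if_neg (by rw [hlx2]; exact hxy), hlx2, PySem.Dict.get?_insert, if_pos rfl]
    · rw [if_neg hag] at hl
      obtain ⟨s, hs, has⟩ := h.memiff a l hl
      by_cases hly : l = ly
      · rw [hly, hy] at hs
        obtain rfl := Option.some.inj hs
        exact absurd has hag
      · by_cases hlx : l = lx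
        · rw [hlx, hx] at hs
          obtain rfl := Option.some.inj hs
          refine ⟨PySem.Set.union gx gy, ?_, (hmemU a).mpr (Or.inl has)⟩
          rw [hG' l, if_neg hly, hlx, PySem.Dict.get?_insert, if_pos rfl]
        · refine ⟨s, ?_, has⟩
          rw [hG' l, if_neg hly, PySem.Dict.get?_insert, if_neg hlx]
          exact hs
  · have hV1 : (((ds.group.insert lx (PySem.Set.union gx gy)).values : List (PySem.Set Char)) : Multiset (PySem.Set Char))
        = PySem.Set.union gx gy ::ₘ (↑(ds.group.values : List (PySem.Set Char)) : Multiset _).erase gx :=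
      values_insert_existing ds.group lx gx _ h.gnodup hx
    have hV2 : ((((ds.group.insert lx (PySem.Set.union gx gy)).erase ly).values : List (PySem.Set Char)) : Multiset (PySem.Set Char))
        = (((ds.group.insert lx (PySem.Set.union gx gy)).values : List (PySem.Set Char)) : Multiset _).erase gy :=
      values_erase_existing _ ly gy hG1nd hG1ly
    have hUne : PySem.Set.union gx gy ≠ gy := by
      intro hh
      exact hlxgy (hh ▸ (hmemU lx).mpr (Or.inl hlxgx))
    have hV3 : ((((ds.group.insert lx (PySem.Set.union gx gy)).erase ly).values : List (PySem.Set Char)) : Multiset (PySem.Set Char))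
        = PySem.Set.union gx gy ::ₘ (((↑(ds.group.values : List (PySem.Set Char)) : Multiset _).erase gx).erase gy) := by
      rw [hV2, hV1, Multiset.erase_cons_tail _ hUne]
    have hVgx : (((ds.group.erase lx).values : List (PySem.Set Char)) : Multiset (PySem.Set Char))
        = (↑(ds.group.values : List (PySem.Set Char)) : Multiset _).erase gx :=
      values_erase_existing ds.group lx gx h.gnodup hx
    have hgymem : gy ∈ (↑(ds.group.values : List (PySem.Set Char)) : Multiset (PySem.Set Char)).erase gx := by
      rw [← hVgx]
      refine Multiset.mem_coe.mpr (values_of_get? _ ly gy ?_)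
      rw [dict_get?_erase, if_neg (Ne.symm hxy)]
      exact hy
    have hUfin : (PySem.Set.union gx gy).toFinset = gx.toFinset ∪ gy.toFinset := by
      ext a
      simp only [List.mem_toFinset, Finset.mem_union]
      exact (hmemU a).trans Iff.rfl
    unfold FS
    rw [← Multiset.map_coe, ← Multiset.map_coe, hV3, Multiset.map_cons,
      multiset_map_erase List.toFinset _ gy hgymem,
      multiset_map_erase List.toFinset _ gx (Multiset.mem_coe.mpr (values_of_get? _ _ _ hx)),
      hUfin]

theorem b_merge (comps : List (List Char)) (ia ib : Nat) (k v : Char) (h : BInv comps)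
    (hia : ia < comps.length) (hib : ib < comps.length) (hij : ia ≠ ib)
    (hk : k ∈ comps[ia]) (hv : v ∈ comps[ib]) :
    BInv ((comps.modify ia (fun c => c ++ comps[ib])).eraseIdx ib) ∧
    (↑(FB ((comps.modify ia (fun c => c ++ comps[ib])).eraseIdx ib)) : Multiset (Finset Char))
      = (comps[ia].toFinset ∪ comps[ib].toFinset) ::ₘ
        (((↑(FB comps) : Multiset (Finset Char)).erase comps[ia].toFinset).erase
          comps[ib].toFinset) := by
  have hTmod : comps.modify ia (fun c => c ++ comps[ib]) = comps.set ia (comps[ia] ++ comps[ib]) := by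
    rw [List.modify_eq_set_get _ hia]
    rfl
  have hne : comps[ia] ≠ comps[ib] := by
    intro hh
    exact absurd ((List.Nodup.getElem_inj_iff h.cuniq).mp hh) hij
  have hdisj : ∀ x ∈ comps[ia], x ∉ comps[ib] :=
    h.cdisj _ (List.getElem_mem hia) _ (List.getElem_mem hib) hne
  have hkib : k ∉ comps[ib] := hdisj k hk
  have hnodL : (↑comps : Multiset (List Char)).Nodup := Multiset.coe_nodup.mpr h.cuniq
  have hset_ms : (↑(comps.set ia (comps[ia] ++ comps[ib])) : Multiset (List Char))
      = (comps[ia] ++ comps[ib]) ::ₘ (↑comps : Multiset (List Char)).erase comps[ia] :=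
    toMultiset_set comps ia _ hia
  have hlen2 : ib < (comps.set ia (comps[ia] ++ comps[ib])).length := by simpa using hib
  have hgetib : (comps.set ia (comps[ia] ++ comps[ib]))[ib] = comps[ib] :=
    List.getElem_set_ne hij hlen2
  have hTneib : comps[ia] ++ comps[ib] ≠ comps[ib] := by
    intro hh
    exact hkib (hh ▸ List.mem_append_left _ hk)
  have hraw : (↑((comps.set ia (comps[ia] ++ comps[ib])).eraseIdx ib) : Multiset (List Char))
      = (comps[ia] ++ comps[ib]) ::ₘ
        (((↑comps : Multiset (List Char)).erase comps[ia]).erase comps[ib]) := by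
    rw [toMultiset_eraseIdx _ ib hlen2, hgetib, hset_ms, Multiset.erase_cons_tail _ hTneib]
  have hmemchar : ∀ c, c ∈ (comps.set ia (comps[ia] ++ comps[ib])).eraseIdx ib ↔
      (c = comps[ia] ++ comps[ib] ∨ (c ∈ comps ∧ c ≠ comps[ia] ∧ c ≠ comps[ib])) := by
    intro c
    rw [← Multiset.mem_coe, hraw, Multiset.mem_cons,
      mem_erase_of_nodup _ _ _ (Multiset.Nodup.erase _ hnodL),
      mem_erase_of_nodup _ _ _ hnodL, Multiset.mem_coe]
    tauto
  rw [hTmod]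
  refine ⟨⟨?_, ?_, ?_, ?_⟩, ?_⟩
  · rw [← Multiset.coe_nodup, hraw, Multiset.nodup_cons]
    constructor
    · intro hTm
      have h1 := (mem_erase_of_nodup _ _ _ (Multiset.Nodup.erase _ hnodL)).mp hTm
      have h2 := (mem_erase_of_nodup _ _ _ hnodL).mp h1.1
      exact h.cdisj _ (List.getElem_mem hia) _ (Multiset.mem_coe.mp h2.1)
        (Ne.symm h2.2) k hk (List.mem_append_left _ hk)
    · exact Multiset.Nodup.erase _ (Multiset.Nodup.erase _ hnodL)
  · intro c hc
    rcases (hmemchar c).mp hc with rfl | ⟨hc1, _, _⟩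
    · rw [List.nodup_append]
      exact ⟨h.cnodup _ (List.getElem_mem hia), h.cnodup _ (List.getElem_mem hib),
        fun a ha b hb => fun hh => hdisj a ha (hh ▸ hb)⟩
    · exact h.cnodup c hc1
  · intro c hc
    rcases (hmemchar c).mp hc with rfl | ⟨hc1, _, _⟩
    · intro hh
      exact h.cne _ (List.getElem_mem hia) (List.append_eq_nil_iff.mp hh).1
    · exact h.cne c hc1
  · intro c hc d hd hcd x hxc hxd
    rcases (hmemchar c).mp hc with rfl | ⟨hc1, hc2, hc3⟩ <;>
      rcases (hmemchar d).mp hd with he | ⟨hd1, hd2, hd3⟩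
    · exact absurd he.symm hcd
    · rcases List.mem_append.mp hxc with hx | hx
      · exact h.cdisj _ (List.getElem_mem hia) d hd1 (fun hh => hd2 hh.symm) x hx hxd
      · exact h.cdisj _ (List.getElem_mem hib) d hd1 (fun hh => hd3 hh.symm) x hx hxd
    · rw [he] at hxd
      rcases List.mem_append.mp hxd with hx | hx
      · exact hc2 (binv_uniq h c hc1 _ (List.getElem_mem hia) x hxc hx)
      · exact hc3 (binv_uniq h c hc1 _ (List.getElem_mem hib) x hxc hx)
    · exact h.cdisj c hc1 d hd1 hcd x hxc hxd
  · unfold FB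
    have hfb : ((comps.set ia (comps[ia] ++ comps[ib])).eraseIdx ib).map List.toFinset
        = ((comps.map List.toFinset).set ia (comps[ia] ++ comps[ib]).toFinset).eraseIdx ib := by
      rw [← List.eraseIdx_map, List.map_set]
    rw [hfb]
    have hlen3 : ib < ((comps.map List.toFinset).set ia (comps[ia] ++ comps[ib]).toFinset).length := by
      simpa using hib
    rw [toMultiset_eraseIdx _ ib hlen3]
    have hgetib2 : ((comps.map List.toFinset).set ia (comps[ia] ++ comps[ib]).toFinset)[ib]
        = comps[ib].toFinset := by
      rw [List.getElem_set_ne hij]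
      exact List.getElem_map _
    rw [hgetib2]
    have hlen4 : ia < (comps.map List.toFinset).length := by simpa using hia
    rw [toMultiset_set _ ia _ hlen4]
    have hgetia : (comps.map List.toFinset)[ia] = comps[ia].toFinset := List.getElem_map _
    rw [hgetia]
    have hTfne : (comps[ia] ++ comps[ib]).toFinset ≠ comps[ib].toFinset := by
      intro hh
      exact hkib (by
        rw [← List.mem_toFinset, ← hh, List.mem_toFinset]
        exact List.mem_append_left _ hk)
    rw [Multiset.erase_cons_tail _ hTfne, List.toFinset_append]

theorem step_inv (ds : PyDS) (comps : List (List Char)) (k v : Char)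
    (hkv : k ≠ v) (h : DSInv ds comps) :
    DSInv (dsAdd ds k v) (mergeStep comps (k, v)) := by
  rcases hLa : ds.leader.get? k with _ | la
  · rcases hLb : ds.leader.get? v with _ | lb
    · -- both fresh
      have hFa : findComp comps k = none := (inv_leader_none_iff h k).mp hLa
      have hFb : findComp comps v = none := (inv_leader_none_iff h v).mp hLb
      have hA := a_new ds k v hkv h.a hLa hLb
      have hB := b_new comps k v hkv h.b
        ((findComp_none_iff comps k).mp hFa) ((findComp_none_iff comps v).mp hFb)
      rw [dsAdd_nn ds k v hLa hLb, mergeStep_nn comps k v hFa hFb]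
      refine ⟨hA.1, hB.1, ?_⟩
      show (↑(FS _) : Multiset (Finset Char)) = ↑(FB _)
      rw [hA.2, hB.2, Multiset.coe_eq_coe]
      exact List.Perm.append_right _ (Multiset.coe_eq_coe.mp h.ms)
    · -- k fresh, v found
      have hFa : findComp comps k = none := (inv_leader_none_iff h k).mp hLa
      obtain ⟨gb, hgb, hvgb⟩ := h.a.memiff v lb hLb
      rcases hFbo : findComp comps v with _ | ib
      · exact absurd hLb (by rw [(inv_leader_none_iff h v).mpr hFbo]; simp)
      obtain ⟨hiblen, hvib⟩ := findComp_some comps v ib hFbo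
      have hcorr : gb.toFinset = comps[ib].toFinset := inv_corr h hLb hgb hFbo hiblen
      have hA := a_ext ds lb k gb h.a hgb hLa
      have hB := b_ext comps ib k h.b hiblen ((findComp_none_iff comps k).mp hFa)
      rw [dsAdd_ns ds k v lb hLa hLb, mergeStep_ns comps k v ib hFa hFbo]
      refine ⟨hA.1, hB.1, ?_⟩
      show (↑(FS _) : Multiset (Finset Char)) = ↑(FB _)
      rw [hA.2, hB.2, hcorr, h.ms]
  · rcases hLb : ds.leader.get? v with _ | lb
    · -- k found, v fresh
      have hFb : findComp comps v = none := (inv_leader_none_iff h v).mp hLb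
      obtain ⟨ga, hga, hkga⟩ := h.a.memiff k la hLa
      rcases hFao : findComp comps k with _ | ia
      · exact absurd hLa (by rw [(inv_leader_none_iff h k).mpr hFao]; simp)
      obtain ⟨hialen, hkia⟩ := findComp_some comps k ia hFao
      have hcorr : ga.toFinset = comps[ia].toFinset := inv_corr h hLa hga hFao hialen
      have hA := a_ext ds la v ga h.a hga hLb
      have hB := b_ext comps ia v h.b hialen ((findComp_none_iff comps v).mp hFb)
      rw [dsAdd_sn ds k v la hLa hLb, mergeStep_sn comps k v ia hFao hFb]
      refine ⟨hA.1, hB.1, ?_⟩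
      show (↑(FS _) : Multiset (Finset Char)) = ↑(FB _)
      rw [hA.2, hB.2, hcorr, h.ms]
    · -- both found
      obtain ⟨ga, hga, hkga⟩ := h.a.memiff k la hLa
      obtain ⟨gb, hgb, hvgb⟩ := h.a.memiff v lb hLb
      rcases hFao : findComp comps k with _ | ia
      · exact absurd hLa (by rw [(inv_leader_none_iff h k).mpr hFao]; simp)
      rcases hFbo : findComp comps v with _ | ib
      · exact absurd hLb (by rw [(inv_leader_none_iff h v).mpr hFbo]; simp)
      obtain ⟨hialen, hkia⟩ := findComp_some comps k ia hFao
      obtain ⟨hiblen, hvib⟩ := findComp_some comps v ib hFbo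
      have hcorra : ga.toFinset = comps[ia].toFinset := inv_corr h hLa hga hFao hialen
      have hcorrb : gb.toFinset = comps[ib].toFinset := inv_corr h hLb hgb hFbo hiblen
      have hiff := inv_eq_iff h hLa hLb hFao hFbo
      by_cases hlab : la = lb
      · obtain rfl := hlab
        obtain rfl : ia = ib := hiff.mp rfl
        rw [dsAdd_ss_eq ds k v la hLa hLb, mergeStep_ss_eq comps k v ia hFao hFbo]
        exact h
      · have hij : ia ≠ ib := fun hh => hlab (hiff.mpr hh)
        have hB := b_merge comps ia ib k v h.b hialen hiblen hij hkia hvib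
        rw [mergeStep_ss_ne comps k v ia ib hFao hFbo hij hiblen]
        by_cases hlen : PySem.Set.len ga < PySem.Set.len gb
        · have hA := a_merge ds lb la gb ga h.a hgb hga (Ne.symm hlab)
          rw [dsAdd_merge_swap ds k v la lb ga gb hLa hLb hlab hga hgb hlen]
          refine ⟨hA.1, hB.1, ?_⟩
          show (↑(FS _) : Multiset (Finset Char)) = ↑(FB _)
          rw [hA.2, hB.2, hcorra, hcorrb, h.ms,
            Finset.union_comm, Multiset.erase_comm]
        · have hA := a_merge ds la lb ga gb h.a hga hgb hlab
          rw [dsAdd_merge_noswap ds k v la lb ga gb hLa hLb hlab hga hgb hlen]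
          refine ⟨hA.1, hB.1, ?_⟩
          show (↑(FS _) : Multiset (Finset Char)) = ↑(FB _)
          rw [hA.2, hB.2, hcorra, hcorrb, h.ms]

theorem fold_inv (edges : List (Char × Char)) :
    ∀ (ds : PyDS) (comps : List (List Char)),
      (∀ kv ∈ edges, kv.1 ≠ kv.2) → DSInv ds comps →
      DSInv (edges.foldl (fun ds kv => dsAdd ds kv.1 kv.2) ds) (edges.foldl mergeStep comps) := by
  induction edges with
  | nil => intro ds comps _ h; exact h
  | cons e rest ih =>
      intro ds comps hne h
      rw [List.foldl_cons, List.foldl_cons]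
      exact ih _ _ (fun kv hkv => hne kv (List.mem_cons_of_mem _ hkv))
        (step_inv ds comps e.1 e.2 (hne e List.mem_cons_self) h)

theorem count_big (ds : PyDS) (comps : List (List Char)) (h : DSInv ds comps) :
    ds.group.items.foldl (fun (acc : Int) kv => if 2 < PySem.Set.len kv.2 then acc + 1 else acc) 0
      = (comps.countP (fun c => 2 < c.length) : Int) := by
  have hfold : ∀ (l : List (Char × PySem.Set Char)) (acc : Int),
      l.foldl (fun (acc : Int) kv => if 2 < PySem.Set.len kv.2 then acc + 1 else acc) acc
        = acc + (l.countP (fun kv => 2 < kv.2.length) : Int) := by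
    intro l
    induction l with
    | nil => intro acc; simp
    | cons kv rest ih =>
        intro acc
        rw [List.foldl_cons, ih, List.countP_cons]
        by_cases hp : 2 < kv.2.length
        · have hp' : 2 < PySem.Set.len kv.2 := by
            simp only [PySem.Set.len]
            exact_mod_cast hp
          simp [hp']
          omega
        · have hp' : ¬ 2 < PySem.Set.len kv.2 := by
            simp only [PySem.Set.len]
            exact_mod_cast hp
          simp [hp, hp']
  rw [hfold, zero_add]
  congr 1
  -- items → values
  have h1 : ds.group.items.countP (fun kv => 2 < kv.2.length)
      = ds.group.values.countP (fun s => 2 < s.length) := by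
    rw [show ds.group.values = ds.group.items.map Prod.snd from rfl, List.countP_map]
    rfl
  -- values → finsets, using elementwise nodup
  have h2 : ds.group.values.countP (fun s => 2 < s.length)
      = (FS ds.group).countP (fun S => 2 < S.card) := by
    unfold FS
    rw [List.countP_map]
    apply List.countP_congr
    intro s hs
    obtain ⟨l, hl⟩ := values_mem_get? ds.group h.a.gnodup s hs
    have hnd := h.a.vnodup l s hl
    simp only [Function.comp_apply, decide_eq_true_eq]
    rw [List.toFinset_card_of_nodup hnd]
  -- finsets A-side → finsets B-side via the multiset identity
  have h3 : (FS ds.group).countP (fun S => 2 < S.card)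
      = (FB comps).countP (fun S => 2 < S.card) := by
    have := congrArg (Multiset.countP (fun S : Finset Char => 2 < S.card)) h.ms
    simpa [Multiset.coe_countP] using this
  -- finsets → comps
  have h4 : (FB comps).countP (fun S => 2 < S.card)
      = comps.countP (fun c => 2 < c.length) := by
    unfold FB
    rw [List.countP_map]
    apply List.countP_congr
    intro c hc
    have hnd := h.b.cnodup c hc
    simp only [Function.comp_apply, decide_eq_true_eq]
    rw [List.toFinset_card_of_nodup hnd]
  rw [h1, h2, h3, h4]

theorem core_eq (m : PySem.Dict Char Char) :
    ((m.items.foldl (loopA m) (⟨PySem.Dict.empty, PySem.Dict.empty⟩, 0, 0)).2.2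
      + PySem.Int.floordiv (m.items.foldl (loopA m) (⟨PySem.Dict.empty, PySem.Dict.empty⟩, 0, 0)).2.1 2
      + (m.items.foldl (loopA m) (⟨PySem.Dict.empty, PySem.Dict.empty⟩, 0, 0)).1.group.items.foldl
          (fun (acc : Int) kv => if 2 < PySem.Set.len kv.2 then acc + 1 else acc) 0)
    = (m.items.countP (fun kv => kv.1 != kv.2) : Int)
      + PySem.Int.floordiv
          (m.items.countP (fun kv => kv.1 != kv.2 && m.get? kv.2 == some kv.1) : Int) 2
      + (((m.items.filter (fun kv => kv.1 != kv.2 && m.get? kv.2 != some kv.1)).foldl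
            mergeStep []).countP (fun c => 2 < c.length) : Int) := by
  have hcount := loopA_count m m.items (⟨PySem.Dict.empty, PySem.Dict.empty⟩, 0, 0)
  have htwo := loopA_two m m.items (⟨PySem.Dict.empty, PySem.Dict.empty⟩, 0, 0)
  have hds := loopA_ds m m.items (⟨PySem.Dict.empty, PySem.Dict.empty⟩, 0, 0)
  have h0 : DSInv ⟨PySem.Dict.empty, PySem.Dict.empty⟩ [] := by
    refine ⟨⟨PySem.Dict.nodup_keys_empty, ?_, ?_, ?_, ?_⟩,
      ⟨List.nodup_nil, ?_, ?_, ?_⟩, rfl⟩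
    · intro l s hg; rw [PySem.Dict.get?_empty] at hg; cases hg
    · intro l s hg; rw [PySem.Dict.get?_empty] at hg; cases hg
    · intro l s hg; rw [PySem.Dict.get?_empty] at hg; cases hg
    · intro a l hl; rw [PySem.Dict.get?_empty] at hl; cases hl
    · intro c hc; cases hc
    · intro c hc; cases hc
    · intro c hc; cases hc
  have hedges : ∀ kv ∈ m.items.filter (fun kv => kv.1 != kv.2 && m.get? kv.2 != some kv.1),
      kv.1 ≠ kv.2 := by
    intro kv hkv
    have h' := (List.mem_filter.mp hkv).2
    rw [Bool.and_eq_true] at h'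
    exact bne_iff_ne.mp h'.1
  have hinv := fold_inv _ ⟨PySem.Dict.empty, PySem.Dict.empty⟩ [] hedges h0
  have hbig := count_big _ _ hinv
  rw [hcount, htwo, hds, hbig, zero_add, zero_add]

-- ===== VERDICT (by name: the statement is the Claim_ definition above) =====
theorem convert_spec : Claim_equal_convert := by
  unfold Claim_equal_convert Spec_convert
  intro str1 str2 _
  unfold convert convert_alt
  by_cases heq : (str1 == str2) = true
  · rw [if_pos heq, if_pos heq]
  · rw [if_neg heq, if_neg heq]
    rw [buildMap_eq _ _ PySem.Dict.nodup_keys_empty]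
    cases hm : buildMapB (str1.toList.zip str2.toList) PySem.Dict.empty with
    | none => rfl
    | some mappings =>
        dsimp only
        by_cases h52 : 52 ≤ PySem.Set.len (PySem.Set.ofList str2.toList)
        · rw [if_pos h52, if_pos h52]
        · rw [if_neg h52, if_neg h52]
          exact core_eq mappings
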